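-- pv_equiv track=rewrite | github.com/lumingya/universal-web-api | app/api/config_routes.py | _get_preset_compare_keys
-- ===== SOURCE A (Python) =====
-- from typing import Optional, Dict, Any, Callable
--
-- _PRESET_COMPARE_FIELD_ORDER = [
--     "selectors",
--     "workflow",
--     "stream_config",
--     "image_extraction",
--     "file_paste",
--     "stealth",
--     "extractor_id",
--     "extractor_verified",
-- ]
--
-- def _get_preset_compare_keys(local_config: Dict[str, Any], main_config: Dict[str, Any]) -> list[str]:
--     remaining = set(local_config.keys()) | set(main_config.keys())
--     ordered = []
--
--     for key in _PRESET_COMPARE_FIELD_ORDER: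
--         if key in remaining:
--             ordered.append(key)
--             remaining.remove(key)
--
--     ordered.extend(sorted(remaining, key=lambda item: str(item)))
--     return ordered
-- ===== SOURCE B (Python) =====
-- from typing import Optional, Dict, Any, Callable
--
-- _PRESET_COMPARE_FIELD_ORDER = [
--     "selectors",
--     "workflow",
--     "stream_config",
--     "image_extraction",
--     "file_paste",
--     "stealth",
--     "extractor_id",
--     "extractor_verified",
-- ]
--
--
-- def _get_preset_compare_keys(local_config: Dict[str, Any], main_config: Dict[str, Any]) -> list[str]:
--     index = {field: i for i, field in enumerate(_PRESET_COMPARE_FIELD_ORDER)}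
--     sentinel = len(_PRESET_COMPARE_FIELD_ORDER)
--     union = set(local_config.keys()) | set(main_config.keys())
--     return sorted(union, key=lambda k: (index.get(k, sentinel), str(k)))
-- ===== Notes on version B (the rewrite author's own statement) =====
-- stated objective: simpler
-- what changed: Replaces the fixed-order pull loop with set removal plus a separate tail sort by one composite-key sort over the key union, using a precomputed {field: position} index with len(order) as the sentinel priority for non-preset keys.
import Mathlib
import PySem

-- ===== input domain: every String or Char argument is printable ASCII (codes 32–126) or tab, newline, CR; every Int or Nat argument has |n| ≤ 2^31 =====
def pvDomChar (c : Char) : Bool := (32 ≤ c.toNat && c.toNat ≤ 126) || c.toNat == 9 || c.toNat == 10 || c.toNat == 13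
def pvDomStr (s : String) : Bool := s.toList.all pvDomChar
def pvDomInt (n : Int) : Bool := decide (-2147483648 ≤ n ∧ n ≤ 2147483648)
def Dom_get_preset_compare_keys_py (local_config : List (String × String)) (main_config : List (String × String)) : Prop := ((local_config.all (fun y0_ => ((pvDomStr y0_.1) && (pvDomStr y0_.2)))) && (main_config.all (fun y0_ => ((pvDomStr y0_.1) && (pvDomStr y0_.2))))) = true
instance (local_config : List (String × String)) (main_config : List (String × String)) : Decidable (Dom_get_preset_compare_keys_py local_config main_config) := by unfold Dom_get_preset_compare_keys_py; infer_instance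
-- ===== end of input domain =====

-- B replaces A's fixed-order pull loop (with set removal) plus tail sort by one composite-key
-- sort over the key union, using a precomputed {field: position} index (objective: simpler).


-- module constant _PRESET_COMPARE_FIELD_ORDER (shared by both ports)
def pvPresetOrder : List String :=
  ["selectors", "workflow", "stream_config", "image_extraction",
   "file_paste", "stealth", "extractor_id", "extractor_verified"]

-- ===== PORT A =====
-- remaining = set(local.keys()) | set(main.keys()); pull preset fields in order (the guarded
-- set.remove is PySem.Set.discard, exact under the membership guard); then append
-- sorted(remaining, key=str) — keys are strings, so key=str(item) is the identity key.
def get_preset_compare_keys_py (local_config : List (String × String)) (main_config : List (String × String)) : List String :=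
  let remaining : PySem.Set String :=
    PySem.Set.union (PySem.Set.ofList (PySem.Dict.keys ⟨local_config⟩))
      (PySem.Set.ofList (PySem.Dict.keys ⟨main_config⟩))
  let st := pvPresetOrder.foldl
    (fun (s : List String × PySem.Set String) key =>
      if PySem.Set.contains s.2 key then (s.1 ++ [key], PySem.Set.discard s.2 key) else s)
    ([], remaining)
  st.1 ++ PySem.List.sorted st.2 (fun item => item) false

-- ===== PORT B =====
-- index = {field: i for i, field in enumerate(order)}; one sort of the key union by the
-- tuple key (index.get(k, len(order)), str(k)) — str(k) = k on string keys.
def get_preset_compare_keys_py_alt (local_config : List (String × String)) (main_config : List (String × String)) : List String :=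
  let index : PySem.Dict String Int :=
    (PySem.List.enumerate pvPresetOrder).foldl (fun d p => PySem.Dict.insert d p.2 p.1) PySem.Dict.empty
  let sentinel : Int := (pvPresetOrder.length : Int)
  let union : PySem.Set String :=
    PySem.Set.union (PySem.Set.ofList (PySem.Dict.keys ⟨local_config⟩))
      (PySem.Set.ofList (PySem.Dict.keys ⟨main_config⟩))
  PySem.List.sorted2 union (fun k => index.getD k sentinel) (fun k => k) false

-- ===== PRECONDITION & SPEC =====
def Spec_get_preset_compare_keys_py (local_config : List (String × String)) (main_config : List (String × String)) (out : List String) : Prop := out = get_preset_compare_keys_py_alt local_config main_config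
instance (local_config : List (String × String)) (main_config : List (String × String)) (out : List String) : Decidable (Spec_get_preset_compare_keys_py local_config main_config out) := by unfold Spec_get_preset_compare_keys_py; infer_instance

-- ===== CLAIM (what is proved, stated in full; the proofs are below) =====
def Claim_equal_get_preset_compare_keys_py : Prop := ∀ (local_config : List (String × String)) (main_config : List (String × String)), Dom_get_preset_compare_keys_py local_config main_config → Spec_get_preset_compare_keys_py local_config main_config (get_preset_compare_keys_py local_config main_config)

-- ===== LEMMAS AND PROOFS =====

-- B's priority lookup, named for the proofs (definitionally the lookup B's port performs)
def pvIdx (y : String) : Int :=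
  ((PySem.List.enumerate pvPresetOrder).foldl (fun d p => PySem.Dict.insert d p.2 p.1)
    PySem.Dict.empty).getD y (pvPresetOrder.length : Int)

-- B's composite sort key, as a single lexicographic key
def pvKey (y : String) : Lex (Int × String) := toLex (pvIdx y, y)

lemma pvKey_lt_iff (a b : String) :
    pvKey a < pvKey b ↔ pvIdx a < pvIdx b ∨ (pvIdx a = pvIdx b ∧ a < b) := by
  simp [pvKey, Prod.Lex.lt_iff]

lemma pvIdx_of_not_mem (y : String) (h : y ∉ pvPresetOrder) : pvIdx y = 8 := by
  simp only [pvPresetOrder, List.mem_cons, not_or] at h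
  obtain ⟨h1, h2, h3, h4, h5, h6, h7, h8, -⟩ := h
  unfold pvIdx
  rw [show ((PySem.List.enumerate pvPresetOrder).foldl
      (fun d p => PySem.Dict.insert d p.2 p.1) PySem.Dict.empty)
      = (⟨[("selectors", 0), ("workflow", 1), ("stream_config", 2), ("image_extraction", 3),
           ("file_paste", 4), ("stealth", 5), ("extractor_id", 6), ("extractor_verified", 7)]⟩ :
          PySem.Dict String Int) from by decide]
  simp [PySem.Dict.getD, PySem.Dict.get?, List.find?, pvPresetOrder,
    show ("selectors" == y) = false by simp [Ne.symm h1],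
    show ("workflow" == y) = false by simp [Ne.symm h2],
    show ("stream_config" == y) = false by simp [Ne.symm h3],
    show ("image_extraction" == y) = false by simp [Ne.symm h4],
    show ("file_paste" == y) = false by simp [Ne.symm h5],
    show ("stealth" == y) = false by simp [Ne.symm h6],
    show ("extractor_id" == y) = false by simp [Ne.symm h7],
    show ("extractor_verified" == y) = false by simp [Ne.symm h8]]

lemma pvIdx_lt_of_mem (x : String) (h : x ∈ pvPresetOrder) : pvIdx x < 8 := by
  fin_cases h <;> decide

lemma pvIdx_pairwise : pvPresetOrder.Pairwise (fun a b => pvIdx a < pvIdx b) := by decide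

-- sorted2 with an Int first key and the identity second key is sorted with one lexicographic key
lemma sorted2_eq_sorted_lex (xs : List String) (k1 : String → Int) :
    PySem.List.sorted2 xs k1 (fun k => k) false
      = PySem.List.sorted xs (fun x => toLex (k1 x, x)) false := by
  rw [PySem.List.sorted_eq_foldl_insertBy]
  simp only [PySem.List.sorted2]
  have hbf : (fun a b => decide (k1 a < k1 b) || (!decide (k1 b < k1 a) && decide (a < b)))
      = (fun (a b : String) => decide (toLex (k1 a, a) < toLex (k1 b, b))) := by
    funext a b
    rcases lt_trichotomy (k1 a) (k1 b) with h | h | h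
    · simp [Prod.Lex.lt_iff, h]
    · simp [Prod.Lex.lt_iff, h]
    · simp [Prod.Lex.lt_iff, h, asymm h, h.ne']
  rw [hbf]
  simp

-- A's pull loop, characterised: appends the keys of ks present in rem (in ks's order) and
-- removes them from rem (for ks without duplicates)
lemma foldA (ks : List String) (hks : ks.Nodup) (acc rem : List String) :
    ks.foldl
      (fun (s : List String × PySem.Set String) key =>
        if PySem.Set.contains s.2 key then (s.1 ++ [key], PySem.Set.discard s.2 key) else s)
      (acc, rem)
    = (acc ++ ks.filter (fun k => rem.contains k), rem.filter (fun x => !ks.contains x)) := by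
  induction ks generalizing acc rem with
  | nil => simp
  | cons k ks ih =>
    obtain ⟨hk, hks'⟩ := List.nodup_cons.mp hks
    by_cases h : rem.contains k
    · have hc : PySem.Set.contains rem k = true := h
      simp only [List.foldl_cons, hc]
      rw [if_pos trivial]
      rw [ih hks' (acc ++ [k]) (PySem.Set.discard rem k)]
      simp only [Prod.mk.injEq]
      constructor
      · rw [List.filter_cons_of_pos (by simpa using h), List.append_assoc]
        simp only [List.singleton_append]
        congr 2
        apply List.filter_congr
        intro x hx
        have hxk : x ≠ k := fun e => hk (e ▸ hx)
        simp [PySem.Set.discard, List.mem_filter, hxk]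
      · simp only [PySem.Set.discard, List.filter_filter]
        apply List.filter_congr
        intro x _
        by_cases hxk : x = k <;> simp [hxk]
    · have hc : PySem.Set.contains rem k = false := by simpa using h
      simp only [List.foldl_cons, hc]
      rw [if_neg (by simp)]
      rw [ih hks' acc rem]
      simp only [Prod.mk.injEq]
      constructor
      · rw [List.filter_cons_of_neg (by simpa using h)]
      · apply List.filter_congr
        intro x hx
        have hxk : x ≠ k := by
          intro e; subst e
          exact absurd (List.contains_iff_mem.mpr hx) (by simpa using h)
        simp [hxk]

-- the core: for any duplicate-free key list U, A's assembly of U equals B's single sort of U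
lemma core (U : List String) (hU : U.Nodup) :
    (pvPresetOrder.filter (fun k => U.contains k))
        ++ PySem.List.sorted (U.filter (fun x => !pvPresetOrder.contains x)) (fun item => item) false
      = PySem.List.sorted U pvKey false := by
  set S := PySem.List.sorted (U.filter (fun x => !pvPresetOrder.contains x)) (fun item => item) false with hSdef
  set P := pvPresetOrder.filter (fun k => U.contains k) with hPdef
  have hSmem : ∀ x ∈ S, x ∈ U ∧ x ∉ pvPresetOrder := by
    intro x hx
    rw [hSdef, PySem.List.mem_sorted, List.mem_filter] at hx
    exact ⟨hx.1, by simpa using hx.2⟩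
  have hperm : (P ++ S).Perm U := by
    have h1 : P.Perm (U.filter (fun x => pvPresetOrder.contains x)) := by
      rw [List.perm_ext_iff_of_nodup (hPdef ▸ (by decide : pvPresetOrder.Nodup).filter _)
        (hU.filter _)]
      intro a
      simp only [hPdef, List.mem_filter, List.contains_iff_mem]
      exact ⟨fun ⟨h1, h2⟩ => ⟨by simpa using h2, by simpa using h1⟩,
        fun ⟨h1, h2⟩ => ⟨by simpa using h2, by simpa using h1⟩⟩
    have h2 : S.Perm (U.filter (fun x => !pvPresetOrder.contains x)) :=
      PySem.List.sorted_perm _ _ _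
    exact (h1.append h2).trans (List.filter_append_perm _ U)
  have hpair : (P ++ S).Pairwise (fun a b => pvKey a < pvKey b) := by
    rw [List.pairwise_append]
    refine ⟨?_, ?_, ?_⟩
    · exact (pvIdx_pairwise.filter _).imp (fun h => (pvKey_lt_iff _ _).mpr (Or.inl h))
    · have hle : S.Pairwise (fun a b => a ≤ b) := PySem.List.sorted_pairwise _ _
      have hne : S.Pairwise (fun a b => a ≠ b) :=
        ((PySem.List.sorted_perm _ _ _).nodup_iff.mpr (hU.filter _))
      refine (hle.and hne).imp_of_mem ?_
      intro a b ha hb hab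
      have h8a := pvIdx_of_not_mem a (hSmem a ha).2
      have h8b := pvIdx_of_not_mem b (hSmem b hb).2
      exact (pvKey_lt_iff _ _).mpr (Or.inr ⟨by rw [h8a, h8b], lt_of_le_of_ne hab.1 hab.2⟩)
    · intro a ha b hb
      have haP : a ∈ pvPresetOrder := (List.mem_filter.mp (hPdef ▸ ha)).1
      have h8b := pvIdx_of_not_mem b (hSmem b hb).2
      exact (pvKey_lt_iff _ _).mpr (Or.inl (by rw [h8b]; exact pvIdx_lt_of_mem a haP))
  exact (PySem.List.sorted_eq_of_perm_of_pairwise_lt U (P ++ S) pvKey hperm hpair).symm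

-- ===== VERDICT (by name: the statement is the Claim_ definition above) =====
theorem get_preset_compare_keys_py_spec : Claim_equal_get_preset_compare_keys_py := by
  intro local_config main_config _
  unfold Spec_get_preset_compare_keys_py
  set U : PySem.Set String :=
    PySem.Set.union (PySem.Set.ofList (PySem.Dict.keys ⟨local_config⟩))
      (PySem.Set.ofList (PySem.Dict.keys ⟨main_config⟩)) with hUdef
  have hU : U.Nodup := PySem.Set.nodup_union _ _ (PySem.Set.nodup_ofList _)
  change (pvPresetOrder.foldl
      (fun (s : List String × PySem.Set String) key =>
        if PySem.Set.contains s.2 key then (s.1 ++ [key], PySem.Set.discard s.2 key) else s)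
      ([], U)).1
      ++ PySem.List.sorted (pvPresetOrder.foldl
      (fun (s : List String × PySem.Set String) key =>
        if PySem.Set.contains s.2 key then (s.1 ++ [key], PySem.Set.discard s.2 key) else s)
      ([], U)).2 (fun item => item) false
    = PySem.List.sorted2 U (fun k => PySem.Dict.getD ((PySem.List.enumerate pvPresetOrder).foldl
        (fun d p => PySem.Dict.insert d p.2 p.1) PySem.Dict.empty) k (pvPresetOrder.length : Int))
        (fun k => k) false
  rw [foldA pvPresetOrder (by decide) [] U]
  rw [sorted2_eq_sorted_lex U (fun k => PySem.Dict.getD ((PySem.List.enumerate pvPresetOrder).foldl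
        (fun d p => PySem.Dict.insert d p.2 p.1) PySem.Dict.empty) k (pvPresetOrder.length : Int))]
  exact core U hU
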